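-- pv_equiv track=rewrite | github.com/adamritter/lazyviewer | lazyviewer/render/__init__.py | _source_line_raw_text
-- ===== SOURCE A (Python) =====
-- def _source_line_display_index(text_lines: list[str], source_line: int, wrap_text: bool) -> int | None:
--     if not text_lines:
--         return None
--
--     target = max(1, source_line)
--     if not wrap_text:
--         idx = target - 1
--         if 0 <= idx < len(text_lines):
--             return idx
--         return None
--
--     current_source = 1
--     for idx, line in enumerate(text_lines):
--         if current_source >= target:
--             return idx
--         if _line_has_newline_terminator(line):
--             current_source += 1
--     return None
--
-- def _source_line_raw_text(
--     text_lines: list[str],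
--     source_line: int,
--     wrap_text: bool,
-- ) -> str:
--     start_idx = _source_line_display_index(text_lines, source_line, wrap_text)
--     if start_idx is None:
--         return ""
--
--     if not wrap_text:
--         return text_lines[start_idx].rstrip("\r\n")
--
--     parts: list[str] = []
--     for idx in range(start_idx, len(text_lines)):
--         part = text_lines[idx]
--         if _line_has_newline_terminator(part):
--             parts.append(part.rstrip("\r\n"))
--             break
--         parts.append(part)
--     return "".join(parts)
--
-- def _line_has_newline_terminator(line: str) -> bool:
--     return line.endswith("\n") or line.endswith("\r")
-- ===== SOURCE B (Python) =====
-- def _source_line_raw_text(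
--     text_lines: list[str],
--     source_line: int,
--     wrap_text: bool,
-- ) -> str:
--     # One fused pass: count source lines until the target, then accumulate.
--     if not text_lines:
--         return ""
--     target = max(1, source_line)
--     if not wrap_text:
--         idx = target - 1
--         if 0 <= idx < len(text_lines):
--             return text_lines[idx].rstrip("\r\n")
--         return ""
--     count = 1
--     acc = ""
--     for line in text_lines:
--         if count >= target:
--             if line.endswith("\n") or line.endswith("\r"):
--                 return acc + line.rstrip("\r\n")
--             acc += line
--         elif line.endswith("\n") or line.endswith("\r"):
--             count += 1
--     return acc
-- ===== Notes on version B (the rewrite author's own statement) =====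
-- stated objective: simpler
-- what changed: Replaced the two-phase helper structure (find the start display index, then a second indexed loop assembling parts) with one fused pass over text_lines that counts source lines and, once the target is reached, accumulates directly into a string; the _source_line_display_index helper and the parts list disappear.
import Mathlib
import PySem

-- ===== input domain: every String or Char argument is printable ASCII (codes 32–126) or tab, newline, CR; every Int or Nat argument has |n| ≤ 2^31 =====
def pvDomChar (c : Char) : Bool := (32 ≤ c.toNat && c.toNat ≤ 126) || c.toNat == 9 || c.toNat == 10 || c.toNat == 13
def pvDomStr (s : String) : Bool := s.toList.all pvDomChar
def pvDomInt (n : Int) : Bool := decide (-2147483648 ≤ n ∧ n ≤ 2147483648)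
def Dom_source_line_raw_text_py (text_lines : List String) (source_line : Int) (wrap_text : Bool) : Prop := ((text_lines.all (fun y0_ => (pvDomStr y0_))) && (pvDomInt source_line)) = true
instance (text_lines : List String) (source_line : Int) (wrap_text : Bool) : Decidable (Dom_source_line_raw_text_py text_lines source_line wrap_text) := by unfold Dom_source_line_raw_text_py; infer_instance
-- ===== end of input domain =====

-- B fuses A's two phases (index search helper + assembly loop) into one counting/accumulating pass; objective: simpler.


-- shared primitive helpers (Python string primitives both programs use)
-- line.endswith("\n") or line.endswith("\r")
def lineHasNewlineTerminator (line : String) : Bool :=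
  PySem.Str.endswith line "\n" || PySem.Str.endswith line "\r"

-- exact hand port of s.rstrip("\r\n"): drop trailing '\r'/'\n' characters
def rstripCRLF (s : String) : String :=
  String.mk ((s.toList.reverse.dropWhile (fun c => c == '\n' || c == '\r')).reverse)

-- ===== PORT A =====
-- the enumerate loop of _source_line_display_index (current_source counter, early return of idx)
def aFind (target : Int) : List String → Nat → Int → Option Int
  | [], _, _ => none
  | line :: rest, idx, cur =>
      if cur ≥ target then some (idx : Int)
      else aFind target rest (idx + 1) (if lineHasNewlineTerminator line then cur + 1 else cur)

def sourceLineDisplayIndex (text_lines : List String) (source_line : Int) (wrap_text : Bool) : Option Int :=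
  if text_lines = [] then none
  else
    let target := max 1 source_line
    if !wrap_text then
      let idx := target - 1
      if 0 ≤ idx ∧ idx < (text_lines.length : Int) then some idx else none
    else
      aFind target text_lines 0 1

-- the 'for idx in range(start_idx, len(text_lines))' assembly loop, iterated over the suffix
def aParts : List String → List String → List String
  | acc, [] => acc
  | acc, part :: rest =>
      if lineHasNewlineTerminator part then acc ++ [rstripCRLF part]
      else aParts (acc ++ [part]) rest

def source_line_raw_text_py (text_lines : List String) (source_line : Int) (wrap_text : Bool) : String :=
  match sourceLineDisplayIndex text_lines source_line wrap_text with
  | none => ""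
  | some start_idx =>
    if !wrap_text then
      rstripCRLF ((PySem.List.pyGet? text_lines start_idx).getD "")  -- index always in range here
    else
      String.join (aParts [] (text_lines.drop start_idx.toNat))  -- start_idx is a nonnegative enumerate index

-- ===== PORT B =====
-- single fused pass: count source lines until target, then accumulate into acc
def bLoop (target : Int) : List String → Int → String → String
  | [], _, acc => acc
  | line :: rest, count, acc =>
      if count ≥ target then
        if lineHasNewlineTerminator line then acc ++ rstripCRLF line
        else bLoop target rest count (acc ++ line)
      else if lineHasNewlineTerminator line then bLoop target rest (count + 1) acc
      else bLoop target rest count acc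

def source_line_raw_text_py_alt (text_lines : List String) (source_line : Int) (wrap_text : Bool) : String :=
  if text_lines = [] then ""
  else
    let target := max 1 source_line
    if !wrap_text then
      let idx := target - 1
      if 0 ≤ idx ∧ idx < (text_lines.length : Int) then
        rstripCRLF ((PySem.List.pyGet? text_lines idx).getD "")
      else ""
    else
      bLoop target text_lines 1 ""

-- ===== PRECONDITION & SPEC =====
def Spec_source_line_raw_text_py (text_lines : List String) (source_line : Int) (wrap_text : Bool) (out : String) : Prop := out = source_line_raw_text_py_alt text_lines source_line wrap_text
instance (text_lines : List String) (source_line : Int) (wrap_text : Bool) (out : String) : Decidable (Spec_source_line_raw_text_py text_lines source_line wrap_text out) := by unfold Spec_source_line_raw_text_py; infer_instance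

-- ===== CLAIM (what is proved, stated in full; the proofs are below) =====
def Claim_equal_source_line_raw_text_py : Prop := ∀ (text_lines : List String) (source_line : Int) (wrap_text : Bool), Dom_source_line_raw_text_py text_lines source_line wrap_text → Spec_source_line_raw_text_py text_lines source_line wrap_text (source_line_raw_text_py text_lines source_line wrap_text)

-- ===== LEMMAS AND PROOFS =====

-- the first offset (into the remaining list) at which the counter has reached the target
def ffo (target : Int) : List String → Int → Option Nat
  | [], _ => none
  | line :: rest, cur =>
      if cur ≥ target then some 0
      else (ffo target rest (if lineHasNewlineTerminator line then cur + 1 else cur)).map (· + 1)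

theorem aFind_eq_ffo (target : Int) (ls : List String) (idx : Nat) (cur : Int) :
    aFind target ls idx cur = (ffo target ls cur).map (fun k => ((idx + k : Nat) : Int)) := by
  induction ls generalizing idx cur with
  | nil => rfl
  | cons line rest ih =>
      simp only [aFind, ffo]
      split
      · simp
      · rw [ih]
        cases ffo target rest (if lineHasNewlineTerminator line then cur + 1 else cur) <;>
          simp <;> omega

theorem join_foldl (l : List String) (s : String) :
    l.foldl (· ++ ·) s = s ++ String.join l := by
  induction l generalizing s with
  | nil => simp [String.join]
  | cons x xs ih =>
      have hc : String.join (x :: xs) = x ++ String.join xs := by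
        show List.foldl (· ++ ·) "" (x :: xs) = _
        simp only [List.foldl_cons]
        rw [ih ("" ++ x)]
        simp
      simp only [List.foldl_cons]
      rw [ih (s ++ x), hc, String.append_assoc]

theorem join_append (l1 l2 : List String) :
    String.join (l1 ++ l2) = String.join l1 ++ String.join l2 := by
  show (l1 ++ l2).foldl (· ++ ·) "" = _
  rw [List.foldl_append]
  exact join_foldl l2 _

-- once the counter has reached the target, bLoop is exactly the assembly loop of A
theorem aParts_eq_bLoop (target : Int) (ls : List String) (cur : Int) (acc : List String)
    (h : cur ≥ target) :
    String.join (aParts acc ls) = bLoop target ls cur (String.join acc) := by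
  induction ls generalizing acc with
  | nil => simp [aParts, bLoop]
  | cons part rest ih =>
      by_cases ht : lineHasNewlineTerminator part = true
      · simp only [aParts, bLoop, if_pos h, if_pos ht]
        rw [join_append]
        simp [String.join]
      · simp only [aParts, bLoop, if_pos h, if_neg ht]
        rw [ih (acc ++ [part]), join_append]
        simp [String.join]

theorem wrap_eq (target : Int) (ls : List String) (cur : Int) :
    (match (ffo target ls cur).map (fun k => ((k : Nat) : Int)) with
      | none => ""
      | some j => String.join (aParts [] (ls.drop j.toNat))) = bLoop target ls cur "" := by
  induction ls generalizing cur with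
  | nil => rfl
  | cons line rest ih =>
      by_cases h : cur ≥ target
      · simp only [ffo, if_pos h, Option.map_some]
        exact aParts_eq_bLoop target (line :: rest) cur [] h
      · by_cases ht : lineHasNewlineTerminator line = true
        · have hb : bLoop target (line :: rest) cur "" = bLoop target rest (cur + 1) "" := by
            simp [bLoop, if_neg h, ht]
          rw [hb, ← ih (cur + 1)]
          simp only [ffo, if_neg h, ht, if_true]
          cases hf : ffo target rest (cur + 1) with
          | none => simp [hf]
          | some k => simp [hf]
        · have hb : bLoop target (line :: rest) cur "" = bLoop target rest cur "" := by
            simp [bLoop, if_neg h, ht]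
          rw [hb, ← ih cur]
          simp only [ffo, if_neg h, ht, if_false]
          cases hf : ffo target rest cur with
          | none => simp [hf]
          | some k => simp [hf]

theorem aWrap_eq (ls : List String) (target : Int) :
    (match aFind target ls 0 1 with
      | none => ""
      | some j => String.join (aParts [] (ls.drop j.toNat))) = bLoop target ls 1 "" := by
  rw [aFind_eq_ffo]
  have hw := wrap_eq target ls 1
  simpa using hw

theorem source_line_raw_text_py_eq (text_lines : List String) (source_line : Int) (wrap_text : Bool) :
    source_line_raw_text_py text_lines source_line wrap_text
      = source_line_raw_text_py_alt text_lines source_line wrap_text := by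
  cases wrap_text with
  | false =>
      by_cases hnil : text_lines = []
      · simp [source_line_raw_text_py, source_line_raw_text_py_alt, sourceLineDisplayIndex, hnil]
      · simp only [source_line_raw_text_py, source_line_raw_text_py_alt, sourceLineDisplayIndex,
          if_neg hnil, Bool.not_false, if_pos rfl]
        split_ifs <;> rfl
  | true =>
      by_cases hnil : text_lines = []
      · simp [source_line_raw_text_py, source_line_raw_text_py_alt, sourceLineDisplayIndex, hnil]
      · have hw := aWrap_eq text_lines (max 1 source_line)
        simp only [source_line_raw_text_py, source_line_raw_text_py_alt, sourceLineDisplayIndex,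
          if_neg hnil]
        simpa using hw

-- ===== VERDICT (by name: the statement is the Claim_ definition above) =====
theorem source_line_raw_text_py_spec : Claim_equal_source_line_raw_text_py := by
  intro text_lines source_line wrap_text _
  unfold Spec_source_line_raw_text_py
  exact source_line_raw_text_py_eq text_lines source_line wrap_text
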